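-- pv_equiv track=rewrite | github.com/timetobye/BOJ_Solution | 1890.py | jump_matrix
-- ===== SOURCE A (Python) =====
-- def jump_matrix(n, arr):
--     dp = [[0 for j in range(n)] for i in range(n)]
--     dp[0][0] = 1
--
--     for start_x in range(n):
--         for start_y in range(n):
--
--             if dp[start_x][start_y] == 0:
--                 continue
--
--             if (start_x == (n - 1)) and (start_y == (n - 1)):
--                 continue
--
--             jump_value = arr[start_x][start_y]
--
--             end_x = jump_value + start_x
--             end_y = jump_value + start_y
--
--             if end_x < n:
--                 dp[end_x][start_y] += dp[start_x][start_y]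
--
--             if end_y < n:
--                 dp[start_x][end_y] += dp[start_x][start_y]
--
--     return dp[n-1][n-1]
-- ===== SOURCE B (Python) =====
-- def jump_matrix(n, arr):
--     dp = [[0] * n for _ in range(n)]
--     dp[0][0] = 1
--     for x in range(n):
--         for y in range(n):
--             if x == 0 and y == 0:
--                 continue
--             s = 0
--             for k in range(1, x + 1):
--                 if arr[x - k][y] == k:
--                     s += dp[x - k][y]
--             for k in range(1, y + 1):
--                 if arr[x][y - k] == k:
--                     s += dp[x][y - k]
--             dp[x][y] = s
--     return dp[n - 1][n - 1]
-- ===== Notes on version B (the rewrite author's own statement) =====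
-- stated objective: alternative
-- what changed: Replaced A's push-based DP (each live cell adds its count forward to the cells its jump value reaches, mutating dp in place) by a pull-based DP: each cell other than (0,0) is computed exactly once as the sum of counts of earlier cells in its row/column whose stored jump length lands exactly on it.
-- outside the precondition, e.g. on jump_matrix(2, [[5, 5]]): A returns 0, B raises IndexError; on jump_matrix(2, [[-1, 1], [1, 1]]): A returns 2, B returns 0
import Mathlib
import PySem

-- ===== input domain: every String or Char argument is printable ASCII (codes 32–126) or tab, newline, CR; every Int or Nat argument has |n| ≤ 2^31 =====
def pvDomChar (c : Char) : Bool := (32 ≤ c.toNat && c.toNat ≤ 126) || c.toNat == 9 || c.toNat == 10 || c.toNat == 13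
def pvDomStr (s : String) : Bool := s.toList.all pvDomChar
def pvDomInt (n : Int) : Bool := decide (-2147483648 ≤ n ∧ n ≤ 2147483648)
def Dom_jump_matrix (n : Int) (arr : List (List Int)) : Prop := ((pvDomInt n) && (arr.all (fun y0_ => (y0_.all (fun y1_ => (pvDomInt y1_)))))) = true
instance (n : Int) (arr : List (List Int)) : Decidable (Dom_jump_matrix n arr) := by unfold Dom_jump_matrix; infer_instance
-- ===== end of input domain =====

-- B replaces A's push-based DP (forward propagation with in-place updates) by a pull-based DP
-- that computes each cell once from its row/column predecessors; alternative decomposition, not faster.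

-- ===== PORT A =====
-- arr[i][j] for in-range Nat indices (all Python accesses are in range under Pre_)
def getA (arr : List (List Int)) (i j : Nat) : Int := (arr.getD i []).getD j 0

-- dp[i][j] read and in-place write of the 2-d table
def get2 (d : List (List Int)) (i j : Nat) : Int := (d.getD i []).getD j 0
def set2 (d : List (List Int)) (i j : Nat) (v : Int) : List (List Int) :=
  d.set i ((d.getD i []).set j v)

-- '[[0 for j in range(n)] for i in range(n)]'
def dp0L (N : Nat) : List (List Int) :=
  (List.range N).map (fun _ => (List.range N).map (fun _ => 0))

-- 'if end_x < n: dp[end_x][start_y] += dp[start_x][start_y]'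
def stepA1 (n : Int) (arr : List (List Int)) (d : List (List Int)) (x y : Nat) : List (List Int) :=
  if getA arr x y + (x : Int) < n then
    set2 d (getA arr x y + (x : Int)).toNat y
      (get2 d (getA arr x y + (x : Int)).toNat y + get2 d x y)
  else d

-- 'if end_y < n: dp[start_x][end_y] += dp[start_x][start_y]'
def stepA2 (n : Int) (arr : List (List Int)) (d : List (List Int)) (x y : Nat) : List (List Int) :=
  if getA arr x y + (y : Int) < n then
    set2 d x (getA arr x y + (y : Int)).toNat
      (get2 d x (getA arr x y + (y : Int)).toNat + get2 d x y)
  else d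

-- one body of A's double loop
def stepA (n : Int) (arr : List (List Int)) (d : List (List Int)) (x y : Nat) : List (List Int) :=
  if get2 d x y = 0 then d
  else if (x : Int) = n - 1 ∧ (y : Int) = n - 1 then d
  else stepA2 n arr (stepA1 n arr d x y) x y

def jump_matrix (n : Int) (arr : List (List Int)) : Int :=
  let N := n.toNat
  let dp0 := set2 (dp0L N) 0 0 1
  let dpF := (List.range N).foldl
    (fun d x => (List.range N).foldl (fun d y => stepA n arr d x y) d) dp0
  get2 dpF (N - 1) (N - 1)

-- ===== PORT B =====
-- sum over k = 1..x of dp[x-k][y] when arr[x-k][y] == k, then over k = 1..y of dp[x][y-k]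
def pullB (arr : List (List Int)) (d : List (List Int)) (x y : Nat) : Int :=
  let s1 := (List.range x).foldl
    (fun s k0 => if getA arr (x - (k0 + 1)) y = ((k0 + 1 : Nat) : Int) then s + get2 d (x - (k0 + 1)) y else s) 0
  (List.range y).foldl
    (fun s k0 => if getA arr x (y - (k0 + 1)) = ((k0 + 1 : Nat) : Int) then s + get2 d x (y - (k0 + 1)) else s) s1

-- one body of B's double loop
def stepB (arr : List (List Int)) (d : List (List Int)) (x y : Nat) : List (List Int) :=
  if x = 0 ∧ y = 0 then d else set2 d x y (pullB arr d x y)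

def jump_matrix_alt (n : Int) (arr : List (List Int)) : Int :=
  let N := n.toNat
  let dp0 := set2 (dp0L N) 0 0 1
  let dpF := (List.range N).foldl
    (fun d x => (List.range N).foldl (fun d y => stepB arr d x y) d) dp0
  get2 dpF (N - 1) (N - 1)

-- ===== PRECONDITION & SPEC =====
-- Pre_ restricts to the task's natural domain: either the trivial board n = 1, or an n×n board
-- (n ≥ 1) whose entries never send a jump to a negative index (entry + row ≥ 0 and entry + column ≥ 0,
-- which holds in particular for all nonnegative jump lengths).  It excludes ragged/undersized arrays
-- and strongly negative entries, on some of which A still returns a value (by never reading the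
-- missing cells, or via Python's negative-index wraparound).
def Pre_jump_matrix (n : Int) (arr : List (List Int)) : Prop :=
  n = 1 ∨ (1 ≤ n ∧ n ≤ (arr.length : Int) ∧
    ∀ x < n.toNat, n ≤ ((arr.getD x []).length : Int) ∧
      ∀ y < n.toNat, 0 ≤ (arr.getD x []).getD y 0 + (x : Int)
                   ∧ 0 ≤ (arr.getD x []).getD y 0 + (y : Int))

instance (n : Int) (arr : List (List Int)) : Decidable (Pre_jump_matrix n arr) := by
  unfold Pre_jump_matrix; infer_instance

def pvWitness_jump_matrix : Int × List (List Int) := (2, [[1, 1], [1, 0]])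

def Spec_jump_matrix (n : Int) (arr : List (List Int)) (out : Int) : Prop := out = jump_matrix_alt n arr
instance (n : Int) (arr : List (List Int)) (out : Int) : Decidable (Spec_jump_matrix n arr out) := by
  unfold Spec_jump_matrix; infer_instance

-- ===== CLAIM (what is proved, stated in full; the proofs are below) =====
def Claim_equal_jump_matrix : Prop := ∀ (n : Int) (arr : List (List Int)),
  Dom_jump_matrix n arr → Pre_jump_matrix n arr → Spec_jump_matrix n arr (jump_matrix n arr)

-- ===== LEMMAS AND PROOFS =====

-- functional model of the dp table, used only in the proofs
def phi (d : List (List Int)) : Nat → Nat → Int := fun a b => get2 d a b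

def updg (d : Nat → Nat → Int) (i j : Nat) (v : Int) : Nat → Nat → Int :=
  fun a b => if a = i ∧ b = j then v else d a b

def stepAF1 (n : Int) (arr : List (List Int)) (d : Nat → Nat → Int) (x y : Nat) : Nat → Nat → Int :=
  if getA arr x y + (x : Int) < n then
    updg d (getA arr x y + (x : Int)).toNat y (d (getA arr x y + (x : Int)).toNat y + d x y)
  else d

def stepAF2 (n : Int) (arr : List (List Int)) (d : Nat → Nat → Int) (x y : Nat) : Nat → Nat → Int :=
  if getA arr x y + (y : Int) < n then
    updg d x (getA arr x y + (y : Int)).toNat (d x (getA arr x y + (y : Int)).toNat + d x y)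
  else d

def stepAF (n : Int) (arr : List (List Int)) (d : Nat → Nat → Int) (x y : Nat) : Nat → Nat → Int :=
  if d x y = 0 then d
  else if (x : Int) = n - 1 ∧ (y : Int) = n - 1 then d
  else stepAF2 n arr (stepAF1 n arr d x y) x y

def pullF (arr : List (List Int)) (d : Nat → Nat → Int) (x y : Nat) : Int :=
  let s1 := (List.range x).foldl
    (fun s k0 => if getA arr (x - (k0 + 1)) y = ((k0 + 1 : Nat) : Int) then s + d (x - (k0 + 1)) y else s) 0
  (List.range y).foldl
    (fun s k0 => if getA arr x (y - (k0 + 1)) = ((k0 + 1 : Nat) : Int) then s + d x (y - (k0 + 1)) else s) s1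

def stepBF (arr : List (List Int)) (d : Nat → Nat → Int) (x y : Nat) : Nat → Nat → Int :=
  if x = 0 ∧ y = 0 then d else updg d x y (pullF arr d x y)

def Shape (N : Nat) (d : List (List Int)) : Prop :=
  d.length = N ∧ ∀ r ∈ d, r.length = N
theorem updg_eq (d : Nat → Nat → Int) (i j : Nat) (v : Int) : updg d i j v i j = v :=
  if_pos ⟨rfl, rfl⟩

theorem updg_ne (d : Nat → Nat → Int) (i j : Nat) (v : Int) (a b : Nat)
    (h : ¬(a = i ∧ b = j)) : updg d i j v a b = d a b := if_neg h

-- fuel-indexed value function: V arr x y = number of paths from (0,0) to (x,y)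
def Vf (arr : List (List Int)) : Nat → Nat → Nat → Int
  | 0, x, y => if x = 0 ∧ y = 0 then 1 else 0
  | f + 1, x, y =>
    if x = 0 ∧ y = 0 then 1
    else ((List.range x).map (fun i => if getA arr i y = (x : Int) - i then Vf arr f i y else 0)).sum
       + ((List.range y).map (fun j => if getA arr x j = (y : Int) - j then Vf arr f x j else 0)).sum

def V (arr : List (List Int)) (x y : Nat) : Int := Vf arr (x + y) x y

theorem Vf_irrel (arr : List (List Int)) :
    ∀ (f g x y : Nat), x + y ≤ f → x + y ≤ g → Vf arr f x y = Vf arr g x y := by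
  intro f
  induction f with
  | zero =>
    intro g x y h1 _
    have hx : x = 0 := by omega
    have hy : y = 0 := by omega
    subst hx; subst hy
    cases g <;> simp [Vf]
  | succ f ih =>
    intro g x y h1 h2
    by_cases h0 : x = 0 ∧ y = 0
    · obtain ⟨rfl, rfl⟩ := h0; cases g <;> simp [Vf]
    · match g, h2 with
      | g' + 1, _ =>
        simp only [Vf, if_neg h0]
        congr 1
        · exact congrArg List.sum (List.map_congr_left (fun i hi => by
            have : i < x := List.mem_range.mp hi
            rw [ih g' i y (by omega) (by omega)]))
        · exact congrArg List.sum (List.map_congr_left (fun j hj => by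
            have : j < y := List.mem_range.mp hj
            rw [ih g' x j (by omega) (by omega)]))
      | 0, h2 => exact absurd h2 (by omega)

theorem V_zero (arr : List (List Int)) : V arr 0 0 = 1 := by simp [V, Vf]

theorem sum_map_range (n : Nat) (f : Nat → Int) :
    ((List.range n).map f).sum = ∑ i ∈ Finset.range n, f i := by
  induction n with
  | zero => simp
  | succ m ih => rw [List.range_succ, Finset.sum_range_succ]; simp [ih]

theorem V_eq (arr : List (List Int)) (x y : Nat) (h : ¬(x = 0 ∧ y = 0)) :
    V arr x y = (∑ i ∈ Finset.range x, if getA arr i y = (x : Int) - i then V arr i y else 0)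
              + (∑ j ∈ Finset.range y, if getA arr x j = (y : Int) - j then V arr x j else 0) := by
  have hfe : x + y = (x + y - 1) + 1 := by omega
  unfold V
  rw [hfe]
  simp only [Vf, if_neg h]
  rw [sum_map_range, sum_map_range]
  congr 1
  · exact Finset.sum_congr rfl (fun i hi => by
      have : i < x := Finset.mem_range.mp hi
      rw [Vf_irrel arr (x + y - 1) (i + y) i y (by omega) (by omega)])
  · exact Finset.sum_congr rfl (fun j hj => by
      have : j < y := Finset.mem_range.mp hj
      rw [Vf_irrel arr (x + y - 1) (x + j) x j (by omega) (by omega)])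

-- partial push-in sums for A's invariant: contributions into (a,b) from sources processed before (x,y)
def S (arr : List (List Int)) (x y a b : Nat) : Int :=
  (if a = 0 ∧ b = 0 then 1 else 0)
  + (∑ i ∈ Finset.range a, if (i < x ∨ (i = x ∧ b < y)) ∧ getA arr i b = (a : Int) - i then V arr i b else 0)
  + (∑ j ∈ Finset.range b, if (a < x ∨ (a = x ∧ j < y)) ∧ getA arr a j = (b : Int) - j then V arr a j else 0)

theorem S_self (arr : List (List Int)) (x y : Nat) : S arr x y x y = V arr x y := by
  by_cases h0 : x = 0 ∧ y = 0
  · obtain ⟨rfl, rfl⟩ := h0; simp [S, V, Vf]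
  · rw [V_eq arr x y h0]
    unfold S
    rw [if_neg h0]
    have hrow : (∑ i ∈ Finset.range x, if (i < x ∨ (i = x ∧ y < y)) ∧ getA arr i y = (x : Int) - i then V arr i y else 0)
        = ∑ i ∈ Finset.range x, if getA arr i y = (x : Int) - i then V arr i y else 0 :=
      Finset.sum_congr rfl (fun i hi => by
        have hi' : i < x := Finset.mem_range.mp hi
        exact if_congr (and_iff_right (by omega)) rfl rfl)
    have hcol : (∑ j ∈ Finset.range y, if (x < x ∨ (x = x ∧ j < y)) ∧ getA arr x j = (y : Int) - j then V arr x j else 0)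
        = ∑ j ∈ Finset.range y, if getA arr x j = (y : Int) - j then V arr x j else 0 :=
      Finset.sum_congr rfl (fun j hj => by
        have hj' : j < y := Finset.mem_range.mp hj
        exact if_congr (and_iff_right (by omega)) rfl rfl)
    rw [hrow, hcol]
    ring

theorem S_succ (arr : List (List Int)) (x y a b : Nat) :
    S arr x (y + 1) a b = S arr x y a b
      + (if x < a ∧ b = y ∧ getA arr x y = (a : Int) - x then V arr x y else 0)
      + (if a = x ∧ y < b ∧ getA arr x y = (b : Int) - y then V arr x y else 0) := by
  unfold S
  have hrow : (∑ i ∈ Finset.range a, if (i < x ∨ (i = x ∧ b < y + 1)) ∧ getA arr i b = (a : Int) - i then V arr i b else 0)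
      = (∑ i ∈ Finset.range a, if (i < x ∨ (i = x ∧ b < y)) ∧ getA arr i b = (a : Int) - i then V arr i b else 0)
      + (if x < a ∧ b = y ∧ getA arr x y = (a : Int) - x then V arr x y else 0) := by
    have hpt : ∀ i, (if (i < x ∨ (i = x ∧ b < y + 1)) ∧ getA arr i b = (a : Int) - i then V arr i b else 0)
        = (if (i < x ∨ (i = x ∧ b < y)) ∧ getA arr i b = (a : Int) - i then V arr i b else 0)
        + (if i = x then (if b = y ∧ getA arr i b = (a : Int) - i then V arr i b else 0) else 0) := by
      intro i
      by_cases hC : getA arr i b = (a : Int) - i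
      · simp only [hC, and_true]
        split_ifs <;> omega
      · rw [if_neg (fun hc => hC hc.2), if_neg (fun hc => hC hc.2)]
        have h3 : (if i = x then (if b = y ∧ getA arr i b = (a : Int) - i then V arr i b else 0) else 0) = 0 := by
          split_ifs with h1 h2
          · exact absurd h2.2 hC
          · rfl
          · rfl
        rw [h3]; simp
    rw [Finset.sum_congr rfl (fun i _ => hpt i), Finset.sum_add_distrib,
        Finset.sum_ite_eq' (Finset.range a) x]
    congr 1
    by_cases hby : b = y
    · subst hby
      simp only [Finset.mem_range]
      split_ifs <;> first | rfl | tauto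
    · simp only [Finset.mem_range]
      split_ifs <;> first | rfl | tauto
  have hcol : (∑ j ∈ Finset.range b, if (a < x ∨ (a = x ∧ j < y + 1)) ∧ getA arr a j = (b : Int) - j then V arr a j else 0)
      = (∑ j ∈ Finset.range b, if (a < x ∨ (a = x ∧ j < y)) ∧ getA arr a j = (b : Int) - j then V arr a j else 0)
      + (if a = x ∧ y < b ∧ getA arr x y = (b : Int) - y then V arr x y else 0) := by
    have hpt : ∀ j, (if (a < x ∨ (a = x ∧ j < y + 1)) ∧ getA arr a j = (b : Int) - j then V arr a j else 0)
        = (if (a < x ∨ (a = x ∧ j < y)) ∧ getA arr a j = (b : Int) - j then V arr a j else 0)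
        + (if j = y then (if a = x ∧ getA arr a j = (b : Int) - j then V arr a j else 0) else 0) := by
      intro j
      by_cases hC : getA arr a j = (b : Int) - j
      · simp only [hC, and_true]
        split_ifs <;> omega
      · rw [if_neg (fun hc => hC hc.2), if_neg (fun hc => hC hc.2)]
        have h3 : (if j = y then (if a = x ∧ getA arr a j = (b : Int) - j then V arr a j else 0) else 0) = 0 := by
          split_ifs with h1 h2
          · exact absurd h2.2 hC
          · rfl
          · rfl
        rw [h3]; simp
    rw [Finset.sum_congr rfl (fun j _ => hpt j), Finset.sum_add_distrib,
        Finset.sum_ite_eq' (Finset.range b) y]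
    congr 1
    by_cases hax : a = x
    · subst hax
      simp only [Finset.mem_range]
      split_ifs <;> first | rfl | tauto
    · simp only [Finset.mem_range]
      split_ifs <;> first | rfl | tauto
  rw [hrow, hcol]
  ring

def InvB (arr : List (List Int)) (N : Nat) (d : Nat → Nat → Int) (x y : Nat) : Prop :=
  ∀ a b, a < N → b < N →
    d a b = if (a < x ∨ (a = x ∧ b < y)) ∨ (a = 0 ∧ b = 0) then V arr a b else 0

def InvA (arr : List (List Int)) (N : Nat) (d : Nat → Nat → Int) (x y : Nat) : Prop :=
  (∀ a b, a < N → b < N → ¬(a < x ∨ (a = x ∧ b < y)) → d a b = S arr x y a b)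
  ∧ ((N - 1 < x ∨ (N - 1 = x ∧ N - 1 < y)) → d (N - 1) (N - 1) = V arr (N - 1) (N - 1))

theorem foldl_range_inv {σ : Type} (step : σ → Nat → σ) (P : σ → Nat → Prop) (M : Nat)
    (hstep : ∀ d y, y < M → P d y → P (step d y) (y + 1)) (d : σ) (h0 : P d 0) :
    P ((List.range M).foldl step d) M := by
  have key : ∀ m, m ≤ M → P ((List.range m).foldl step d) m := by
    intro m hm
    induction m with
    | zero => simpa using h0
    | succ k ih =>
      rw [List.range_succ, List.foldl_append]
      exact hstep _ k (by omega) (ih (by omega))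
  exact key M le_rfl

theorem foldl_if_add (p : Nat → Prop) [DecidablePred p] (f : Nat → Int) (l : List Nat) (init : Int) :
    l.foldl (fun s k => if p k then s + f k else s) init
      = init + (l.map (fun k => if p k then f k else 0)).sum := by
  induction l generalizing init with
  | nil => simp
  | cons k t ih =>
    simp only [List.foldl_cons, List.map_cons, List.sum_cons]
    rw [ih]
    split_ifs <;> ring

theorem pull_eq_V (arr : List (List Int)) (N : Nat) (d : Nat → Nat → Int) (x y : Nat)
    (hx : x < N) (hy : y < N) (h0 : ¬(x = 0 ∧ y = 0)) (h : InvB arr N d x y) :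
    pullF arr d x y = V arr x y := by
  unfold pullF
  rw [foldl_if_add (p := fun k0 => getA arr (x - (k0 + 1)) y = ((k0 + 1 : Nat) : Int))
        (f := fun k0 => d (x - (k0 + 1)) y),
      foldl_if_add (p := fun k0 => getA arr x (y - (k0 + 1)) = ((k0 + 1 : Nat) : Int))
        (f := fun k0 => d x (y - (k0 + 1))),
      sum_map_range, sum_map_range]
  have hrow : (∑ k0 ∈ Finset.range x, if getA arr (x - (k0 + 1)) y = ((k0 + 1 : Nat) : Int) then d (x - (k0 + 1)) y else 0)
      = ∑ i ∈ Finset.range x, if getA arr i y = (x : Int) - i then V arr i y else 0 := by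
    rw [← Finset.sum_range_reflect (fun i => if getA arr i y = (x : Int) - i then V arr i y else 0) x]
    refine Finset.sum_congr rfl (fun k0 hk0 => ?_)
    have hk : k0 < x := Finset.mem_range.mp hk0
    have hidx : x - 1 - k0 = x - (k0 + 1) := by omega
    rw [hidx]
    have hcast : (x : Int) - ((x - (k0 + 1) : Nat) : Int) = ((k0 + 1 : Nat) : Int) := by omega
    rw [hcast, h (x - (k0 + 1)) y (by omega) hy, if_pos (Or.inl (Or.inl (by omega)))]
  have hcol : (∑ k0 ∈ Finset.range y, if getA arr x (y - (k0 + 1)) = ((k0 + 1 : Nat) : Int) then d x (y - (k0 + 1)) else 0)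
      = ∑ j ∈ Finset.range y, if getA arr x j = (y : Int) - j then V arr x j else 0 := by
    rw [← Finset.sum_range_reflect (fun j => if getA arr x j = (y : Int) - j then V arr x j else 0) y]
    refine Finset.sum_congr rfl (fun k0 hk0 => ?_)
    have hk : k0 < y := Finset.mem_range.mp hk0
    have hidx : y - 1 - k0 = y - (k0 + 1) := by omega
    rw [hidx]
    have hcast : (y : Int) - ((y - (k0 + 1) : Nat) : Int) = ((k0 + 1 : Nat) : Int) := by omega
    rw [hcast, h x (y - (k0 + 1)) hx (by omega), if_pos (Or.inl (Or.inr ⟨rfl, by omega⟩))]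
  rw [hrow, hcol, V_eq arr x y h0]
  ring

theorem stepBF_inv (arr : List (List Int)) (N : Nat) (d : Nat → Nat → Int) (x y : Nat)
    (hx : x < N) (hy : y < N) (h : InvB arr N d x y) :
    InvB arr N (stepBF arr d x y) x (y + 1) := by
  intro a b ha hb
  unfold stepBF
  by_cases h0 : x = 0 ∧ y = 0
  · rw [if_pos h0]
    rw [h a b ha hb]
    exact if_congr (by omega) rfl rfl
  · rw [if_neg h0]
    unfold updg
    by_cases hab : a = x ∧ b = y
    · obtain ⟨rfl, rfl⟩ := hab
      rw [if_pos ⟨rfl, rfl⟩, if_pos (Or.inl (Or.inr ⟨rfl, by omega⟩))]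
      exact pull_eq_V arr N d a b hx hy h0 h
    · rw [if_neg hab, h a b ha hb]
      exact if_congr (by omega) rfl rfl

theorem InvB_roll (arr : List (List Int)) (N : Nat) (d : Nat → Nat → Int) (x : Nat)
    (h : InvB arr N d x N) : InvB arr N d (x + 1) 0 := by
  intro a b ha hb
  rw [h a b ha hb]
  exact if_congr (by omega) rfl rfl

theorem stepAF1_ne (n : Int) (arr : List (List Int)) (d : Nat → Nat → Int) (x y a b : Nat)
    (h : getA arr x y + (x : Int) < n → ¬(a = (getA arr x y + (x : Int)).toNat ∧ b = y)) :
    stepAF1 n arr d x y a b = d a b := by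
  unfold stepAF1; split_ifs with hc
  · exact updg_ne _ _ _ _ _ _ (h hc)
  · rfl

theorem stepAF1_hit (n : Int) (arr : List (List Int)) (d : Nat → Nat → Int) (x y : Nat)
    (hc : getA arr x y + (x : Int) < n) :
    stepAF1 n arr d x y (getA arr x y + (x : Int)).toNat y
      = d (getA arr x y + (x : Int)).toNat y + d x y := by
  unfold stepAF1; rw [if_pos hc]; exact updg_eq _ _ _ _

theorem stepAF2_ne (n : Int) (arr : List (List Int)) (d : Nat → Nat → Int) (x y a b : Nat)
    (h : getA arr x y + (y : Int) < n → ¬(a = x ∧ b = (getA arr x y + (y : Int)).toNat)) :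
    stepAF2 n arr d x y a b = d a b := by
  unfold stepAF2; split_ifs with hc
  · exact updg_ne _ _ _ _ _ _ (h hc)
  · rfl

theorem stepAF2_hit (n : Int) (arr : List (List Int)) (d : Nat → Nat → Int) (x y : Nat)
    (hc : getA arr x y + (y : Int) < n) :
    stepAF2 n arr d x y x (getA arr x y + (y : Int)).toNat
      = d x (getA arr x y + (y : Int)).toNat + d x y := by
  unfold stepAF2; rw [if_pos hc]; exact updg_eq _ _ _ _

theorem stepAF_inv (n : Int) (arr : List (List Int)) (N : Nat) (hN : N = n.toNat) (hn : 1 ≤ n)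
    (hA : ∀ i j, i < N → j < N → 0 ≤ getA arr i j + (i : Int) ∧ 0 ≤ getA arr i j + (j : Int))
    (d : Nat → Nat → Int) (x y : Nat) (hx : x < N) (hy : y < N) (h : InvA arr N d x y) :
    InvA arr N (stepAF n arr d x y) x (y + 1) := by
  obtain ⟨h1, h2⟩ := h
  have hdxy : d x y = V arr x y := by
    rw [h1 x y hx hy (by omega), S_self]
  obtain ⟨hpx, hpy⟩ := hA x y hx hy
  constructor
  · intro a b ha hb hnot
    have hab_ne : ¬(a = x ∧ b = y) := by omega
    have hd : d a b = S arr x y a b := h1 a b ha hb (by omega)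
    rw [S_succ]
    unfold stepAF
    by_cases hz : d x y = 0
    · rw [if_pos hz]
      have hV0 : V arr x y = 0 := by rw [← hdxy]; exact hz
      rw [hd, hV0]
      simp
    · rw [if_neg hz]
      by_cases hfin : (x : Int) = n - 1 ∧ (y : Int) = n - 1
      · exfalso; omega
      · rw [if_neg hfin]
        by_cases hu1 : getA arr x y + (x : Int) < n ∧ a = (getA arr x y + (x : Int)).toNat ∧ b = y
        · obtain ⟨hc1, ha1, hb1⟩ := hu1
          subst a; subst b
          rw [stepAF2_ne n arr _ x y _ _ (fun _ hh => by omega),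
              stepAF1_hit n arr d x y hc1, hd, hdxy,
              if_pos (⟨by omega, rfl, by omega⟩ :
                x < (getA arr x y + (x : Int)).toNat ∧ _ ∧ _),
              if_neg (by omega :
                ¬((getA arr x y + (x : Int)).toNat = x ∧ _ ∧ _))]
          ring
        · by_cases hu2 : getA arr x y + (y : Int) < n ∧ a = x ∧ b = (getA arr x y + (y : Int)).toNat
          · obtain ⟨hc2, ha2, hb2⟩ := hu2
            subst a; subst b
            have hvpos : 0 < getA arr x y := by omega
            rw [stepAF2_hit n arr _ x y hc2,
                stepAF1_ne n arr d x y _ _ (fun _ hh => by omega),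
                stepAF1_ne n arr d x y _ _ (fun _ hh => by omega),
                hd, hdxy,
                if_neg (by omega), if_pos (⟨rfl, by omega, by omega⟩ : _ ∧ _ ∧ _)]
            ring
          · rw [stepAF2_ne n arr _ x y _ _ (fun hc2 hh => hu2 ⟨hc2, hh.1, hh.2⟩),
                stepAF1_ne n arr d x y _ _ (fun hc1 hh => hu1 ⟨hc1, hh.1, hh.2⟩),
                hd, if_neg (by omega), if_neg (by omega)]
            ring
  · intro hproc
    by_cases hxyfin : x = N - 1 ∧ y = N - 1
    · obtain ⟨rfl, rfl⟩ := hxyfin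
      unfold stepAF
      split_ifs with hz hfin
      · exact hdxy
      · exact hdxy
      · exfalso; omega
    · exfalso; omega

theorem S_roll (arr : List (List Int)) (N x a b : Nat) (hb : b < N) :
    S arr x N a b = S arr (x + 1) 0 a b := by
  unfold S
  congr 1
  · congr 1
    exact Finset.sum_congr rfl (fun i hi => if_congr
      (and_congr_left' (by have := Finset.mem_range.mp hi; omega)) rfl rfl)
  · exact Finset.sum_congr rfl (fun j hj => if_congr
      (and_congr_left' (by have := Finset.mem_range.mp hj; omega)) rfl rfl)

theorem InvA_roll (arr : List (List Int)) (N : Nat) (d : Nat → Nat → Int) (x : Nat)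
    (hN1 : 1 ≤ N) (h : InvA arr N d x N) : InvA arr N d (x + 1) 0 := by
  obtain ⟨h1, h2⟩ := h
  constructor
  · intro a b ha hb hnot
    rw [h1 a b ha hb (by omega), S_roll arr N x a b hb]
  · intro hproc
    exact h2 (by omega)


theorem shape_set2 (N : Nat) (d : List (List Int)) (i j : Nat) (v : Int)
    (h : Shape N d) : Shape N (set2 d i j v) := by
  obtain ⟨h1, h2⟩ := h
  by_cases hi : i < d.length
  · constructor
    · simp [set2, h1]
    · intro r hr
      rcases List.mem_or_eq_of_mem_set hr with hmem | rfl
      · exact h2 r hmem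
      · rw [List.length_set, List.getD_eq_getElem _ _ hi]
        exact h2 _ (List.getElem_mem hi)
  · have he : set2 d i j v = d := List.set_eq_of_length_le (by omega)
    rw [he]
    exact ⟨h1, h2⟩

theorem getD_set_eq {α : Type} (l : List α) (i : Nat) (x : α) (dflt : α)
    (h : i < l.length) : (l.set i x).getD i dflt = x := by
  rw [List.getD_eq_getElem _ _ (by rw [List.length_set]; omega)]
  exact List.getElem_set_self _

theorem getD_set_ne {α : Type} (l : List α) (i c : Nat) (x : α) (dflt : α)
    (h : c ≠ i) : (l.set i x).getD c dflt = l.getD c dflt := by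
  by_cases hcL : c < l.length
  · rw [List.getD_eq_getElem _ _ (by rw [List.length_set]; omega),
        List.getElem_set_ne (by omega) _, List.getD_eq_getElem _ _ hcL]
  · rw [List.getD_eq_default _ _ (by rw [List.length_set]; omega),
        List.getD_eq_default _ _ (by omega)]

theorem get2_dp0 (N : Nat) (a b : Nat) : get2 (dp0L N) a b = 0 := by
  have hrep : dp0L N = List.replicate N (List.replicate N (0 : Int)) := by
    simp [dp0L, List.map_const']
  have router : (List.replicate N (List.replicate N (0 : Int))).getD a []
      = if a < N then List.replicate N (0 : Int) else [] := by
    rw [List.getD_eq_getElem?_getD, List.getElem?_replicate]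
    split_ifs <;> rfl
  unfold get2
  rw [hrep, router]
  split_ifs
  · rw [List.getD_eq_getElem?_getD, List.getElem?_replicate]
    split_ifs <;> rfl
  · rfl

theorem get2_set2 (N : Nat) (d : List (List Int)) (i j : Nat) (v : Int) (a b : Nat)
    (h : Shape N d) (hi : i < N) (hj : j < N) :
    get2 (set2 d i j v) a b = updg (phi d) i j v a b := by
  obtain ⟨h1, h2⟩ := h
  have hiL : i < d.length := by omega
  have hrow : (d.getD i []).length = N := by
    rw [List.getD_eq_getElem _ _ hiL]
    exact h2 _ (List.getElem_mem hiL)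
  unfold get2 set2 updg phi get2
  by_cases hai : a = i
  · subst hai
    rw [getD_set_eq _ _ _ _ hiL]
    by_cases hbj : b = j
    · subst hbj
      rw [if_pos ⟨rfl, rfl⟩]
      exact getD_set_eq _ _ _ _ (by omega)
    · rw [if_neg (by tauto)]
      exact getD_set_ne _ _ _ _ _ hbj
  · rw [if_neg (by tauto)]
    rw [getD_set_ne _ _ _ _ _ hai]

theorem shape_dp0 (N : Nat) : Shape N (dp0L N) := by
  constructor
  · simp [dp0L]
  · intro r hr
    obtain ⟨_, _, rfl⟩ := List.mem_map.mp hr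
    simp

theorem phi_dp0 (N : Nat) (hN : 1 ≤ N) :
    phi (set2 (dp0L N) 0 0 1) = fun a b => if a = 0 ∧ b = 0 then (1 : Int) else 0 := by
  funext a b
  show get2 (set2 (dp0L N) 0 0 1) a b = _
  rw [get2_set2 N _ 0 0 1 a b (shape_dp0 N) (by omega) (by omega)]
  unfold updg phi
  rw [get2_dp0]

theorem pullB_phi (arr : List (List Int)) (d : List (List Int)) (x y : Nat) :
    pullB arr d x y = pullF arr (phi d) x y := rfl

theorem stepA1_phi (n : Int) (arr : List (List Int)) (N : Nat) (d : List (List Int)) (x y : Nat)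
    (hN : N = n.toNat) (hn : 1 ≤ n) (hy : y < N) (h : Shape N d) :
    Shape N (stepA1 n arr d x y) ∧ phi (stepA1 n arr d x y) = stepAF1 n arr (phi d) x y := by
  unfold stepA1 stepAF1
  split_ifs with hc
  · refine ⟨shape_set2 N d _ _ _ h, funext fun a => funext fun b => ?_⟩
    show get2 _ a b = _
    rw [get2_set2 N d _ _ _ a b h (by omega) hy]
    rfl
  · exact ⟨h, rfl⟩

theorem stepA2_phi (n : Int) (arr : List (List Int)) (N : Nat) (d : List (List Int)) (x y : Nat)
    (hN : N = n.toNat) (hn : 1 ≤ n) (hx : x < N) (h : Shape N d) :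
    Shape N (stepA2 n arr d x y) ∧ phi (stepA2 n arr d x y) = stepAF2 n arr (phi d) x y := by
  unfold stepA2 stepAF2
  split_ifs with hc
  · refine ⟨shape_set2 N d _ _ _ h, funext fun a => funext fun b => ?_⟩
    show get2 _ a b = _
    rw [get2_set2 N d _ _ _ a b h hx (by omega)]
    rfl
  · exact ⟨h, rfl⟩

theorem stepA_phi (n : Int) (arr : List (List Int)) (N : Nat) (d : List (List Int)) (x y : Nat)
    (hN : N = n.toNat) (hn : 1 ≤ n) (hx : x < N) (hy : y < N) (h : Shape N d) :
    Shape N (stepA n arr d x y) ∧ phi (stepA n arr d x y) = stepAF n arr (phi d) x y := by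
  unfold stepA stepAF
  have hdx : get2 d x y = phi d x y := rfl
  rw [hdx]
  split_ifs with h1 h2
  · exact ⟨h, rfl⟩
  · exact ⟨h, rfl⟩
  · obtain ⟨s1, e1⟩ := stepA1_phi n arr N d x y hN hn hy h
    obtain ⟨s2, e2⟩ := stepA2_phi n arr N (stepA1 n arr d x y) x y hN hn hx s1
    rw [e1] at e2
    exact ⟨s2, e2⟩

theorem stepB_phi (arr : List (List Int)) (N : Nat) (d : List (List Int)) (x y : Nat)
    (hx : x < N) (hy : y < N) (h : Shape N d) :
    Shape N (stepB arr d x y) ∧ phi (stepB arr d x y) = stepBF arr (phi d) x y := by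
  unfold stepB stepBF
  split_ifs with hc
  · exact ⟨h, rfl⟩
  · refine ⟨shape_set2 N d _ _ _ h, funext fun a => funext fun b => ?_⟩
    show get2 _ a b = _
    rw [get2_set2 N d _ _ _ a b h hx hy, pullB_phi]

theorem foldl_phi {σ τ : Type} (gL : σ → Nat → σ) (gF : τ → Nat → τ) (f : σ → τ)
    (Sh : σ → Prop) (M : Nat)
    (h : ∀ d k, k < M → Sh d → Sh (gL d k) ∧ f (gL d k) = gF (f d) k)
    (d0 : σ) (h0 : Sh d0) :
    Sh ((List.range M).foldl gL d0)
      ∧ f ((List.range M).foldl gL d0) = (List.range M).foldl gF (f d0) := by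
  have key := foldl_range_inv gL
    (fun d k => Sh d ∧ f d = (List.range k).foldl gF (f d0)) M ?_ d0 ⟨h0, by simp⟩
  · exact ⟨key.1, key.2⟩
  · intro d k hk hP
    obtain ⟨hsh, he⟩ := hP
    obtain ⟨s1, s2⟩ := h d k hk hsh
    refine ⟨s1, ?_⟩
    rw [s2, he, List.range_succ, List.foldl_append]
    rfl

theorem pre_bounds (n : Int) (arr : List (List Int))
    (h : ∀ x < n.toNat, n ≤ ((arr.getD x []).length : Int) ∧
      ∀ y < n.toNat, 0 ≤ (arr.getD x []).getD y 0 + (x : Int)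
                   ∧ 0 ≤ (arr.getD x []).getD y 0 + (y : Int)) :
    ∀ i j, i < n.toNat → j < n.toNat →
      0 ≤ getA arr i j + (i : Int) ∧ 0 ≤ getA arr i j + (j : Int) := by
  intro i j hi hj
  exact (h i hi).2 j hj

theorem A_eq_V (n : Int) (arr : List (List Int)) (hn : 1 ≤ n)
    (hA : ∀ i j, i < n.toNat → j < n.toNat →
      0 ≤ getA arr i j + (i : Int) ∧ 0 ≤ getA arr i j + (j : Int)) :
    jump_matrix n arr = V arr (n.toNat - 1) (n.toNat - 1) := by
  have hN1 : 1 ≤ n.toNat := by omega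
  have hshow : jump_matrix n arr = get2 ((List.range n.toNat).foldl
      (fun d x => (List.range n.toNat).foldl (fun d y => stepA n arr d x y) d)
      (set2 (dp0L n.toNat) 0 0 1)) (n.toNat - 1) (n.toNat - 1) := rfl
  obtain ⟨hsF, hphiF⟩ := foldl_phi
    (fun d x => (List.range n.toNat).foldl (fun d y => stepA n arr d x y) d)
    (fun D x => (List.range n.toNat).foldl (fun D y => stepAF n arr D x y) D)
    phi (Shape n.toNat) n.toNat
    (fun d x hx hs => foldl_phi
      (fun d y => stepA n arr d x y) (fun D y => stepAF n arr D x y)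
      phi (Shape n.toNat) n.toNat
      (fun d y hy hs' => stepA_phi n arr n.toNat d x y rfl hn hx hy hs') d hs)
    (set2 (dp0L n.toNat) 0 0 1) (shape_set2 _ _ _ _ _ (shape_dp0 n.toNat))
  have inv0 : InvA arr n.toNat (fun a b => if a = 0 ∧ b = 0 then 1 else 0) 0 0 := by
    constructor
    · intro a b _ _ _
      unfold S
      simp
    · intro hproc; exfalso; omega
  have key : InvA arr n.toNat ((List.range n.toNat).foldl
      (fun D x => (List.range n.toNat).foldl (fun D y => stepAF n arr D x y) D)
      (fun a b => if a = 0 ∧ b = 0 then 1 else 0)) n.toNat 0 := by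
    refine foldl_range_inv _ (fun D x => InvA arr n.toNat D x 0) n.toNat ?_ _ inv0
    intro D x hxN hInv
    refine InvA_roll arr n.toNat _ x hN1 ?_
    exact foldl_range_inv _ (fun D y => InvA arr n.toNat D x y) n.toNat
      (fun D y hyN hI => stepAF_inv n arr n.toNat rfl hn hA D x y hxN hyN hI) D hInv
  rw [hshow]
  show phi _ (n.toNat - 1) (n.toNat - 1) = _
  rw [hphiF, phi_dp0 n.toNat hN1]
  exact key.2 (by omega)

theorem B_eq_V (n : Int) (arr : List (List Int)) (hn : 1 ≤ n) :
    jump_matrix_alt n arr = V arr (n.toNat - 1) (n.toNat - 1) := by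
  have hN1 : 1 ≤ n.toNat := by omega
  have hshow : jump_matrix_alt n arr = get2 ((List.range n.toNat).foldl
      (fun d x => (List.range n.toNat).foldl (fun d y => stepB arr d x y) d)
      (set2 (dp0L n.toNat) 0 0 1)) (n.toNat - 1) (n.toNat - 1) := rfl
  obtain ⟨hsF, hphiF⟩ := foldl_phi
    (fun d x => (List.range n.toNat).foldl (fun d y => stepB arr d x y) d)
    (fun D x => (List.range n.toNat).foldl (fun D y => stepBF arr D x y) D)
    phi (Shape n.toNat) n.toNat
    (fun d x hx hs => foldl_phi
      (fun d y => stepB arr d x y) (fun D y => stepBF arr D x y)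
      phi (Shape n.toNat) n.toNat
      (fun d y hy hs' => stepB_phi arr n.toNat d x y hx hy hs') d hs)
    (set2 (dp0L n.toNat) 0 0 1) (shape_set2 _ _ _ _ _ (shape_dp0 n.toNat))
  have inv0 : InvB arr n.toNat (fun a b => if a = 0 ∧ b = 0 then 1 else 0) 0 0 := by
    intro a b _ _
    dsimp only []
    by_cases h : a = 0 ∧ b = 0
    · obtain ⟨rfl, rfl⟩ := h
      rw [if_pos ⟨rfl, rfl⟩, if_pos (Or.inr ⟨rfl, rfl⟩), V_zero]
    · rw [if_neg h, if_neg (by omega)]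
  have key : InvB arr n.toNat ((List.range n.toNat).foldl
      (fun D x => (List.range n.toNat).foldl (fun D y => stepBF arr D x y) D)
      (fun a b => if a = 0 ∧ b = 0 then 1 else 0)) n.toNat 0 := by
    refine foldl_range_inv _ (fun D x => InvB arr n.toNat D x 0) n.toNat ?_ _ inv0
    intro D x hxN hInv
    refine InvB_roll arr n.toNat _ x ?_
    exact foldl_range_inv _ (fun D y => InvB arr n.toNat D x y) n.toNat
      (fun D y hyN hI => stepBF_inv arr n.toNat D x y hxN hyN hI) D hInv
  rw [hshow]
  show phi _ (n.toNat - 1) (n.toNat - 1) = _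
  rw [hphiF, phi_dp0 n.toNat hN1]
  rw [key (n.toNat - 1) (n.toNat - 1) (by omega) (by omega), if_pos (by omega)]

theorem n_one_eq (arr : List (List Int)) : jump_matrix 1 arr = jump_matrix_alt 1 arr := rfl

-- ===== VERDICT (by name: the statement is the Claim_ definition above) =====
theorem jump_matrix_spec : Claim_equal_jump_matrix := by
  intro n arr _ hpre
  unfold Spec_jump_matrix
  rcases hpre with rfl | ⟨hn, _, hbounds⟩
  · exact n_one_eq arr
  · rw [A_eq_V n arr hn (pre_bounds n arr hbounds), B_eq_V n arr hn]
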